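-- pv_equiv track=rewrite | github.com/aerovfx/teamteenteen | APPENDIX_A/Python/PythonChallenge/Level3/de53/DOIHUONG.PY | calculate_rotation_count
-- ===== SOURCE A (Python) =====
-- def calculate_rotation_count(directions, target_direction):
--     rotation_count = 0
--
--     for direction in directions:
--         if direction == target_direction:
--             continue
--         elif direction == 1:  # Nhìn về trước
--             if target_direction == 2:  # Nếu muốn nhìn về phía sau
--                 rotation_count += 2
--             else:
--                 rotation_count += 1
--         elif direction == 2:  # Nhìn về phía sau
--             if target_direction == 1:  # Nếu muốn nhìn về trước
--                 rotation_count += 2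
--             else:
--                 rotation_count += 1
--         elif direction == 3:  # Nhìn sang trái
--             if target_direction == 4:  # Nếu muốn nhìn sang phải
--                 rotation_count += 2
--             else:
--                 rotation_count += 1
--         elif direction == 4:  # Nhìn sang phải
--             if target_direction == 3:  # Nếu muốn nhìn sang trái
--                 rotation_count += 2
--             else:
--                 rotation_count += 1
--
--     return rotation_count
-- ===== SOURCE B (Python) =====
-- def calculate_rotation_count(directions, target_direction):
--     # One tally pass + closed form: each of 1..4 not equal to target costs 1,
--     # and the target's opposite costs one extra.
--     c1 = c2 = c3 = c4 = 0
--     for d in directions: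
--         if d == 1:
--             c1 += 1
--         elif d == 2:
--             c2 += 1
--         elif d == 3:
--             c3 += 1
--         elif d == 4:
--             c4 += 1
--     valid = c1 + c2 + c3 + c4
--     if target_direction == 1:
--         return valid - c1 + c2
--     elif target_direction == 2:
--         return valid - c2 + c1
--     elif target_direction == 3:
--         return valid - c3 + c4
--     elif target_direction == 4:
--         return valid - c4 + c3
--     return valid
-- ===== Notes on version B (the rewrite author's own statement) =====
-- stated objective: alternative
-- what changed: Replaces per-element target/opposite branching with a single tally pass into four counters followed by a closed-form combination (valid - count[target] + count[opposite]).
import Mathlib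
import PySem

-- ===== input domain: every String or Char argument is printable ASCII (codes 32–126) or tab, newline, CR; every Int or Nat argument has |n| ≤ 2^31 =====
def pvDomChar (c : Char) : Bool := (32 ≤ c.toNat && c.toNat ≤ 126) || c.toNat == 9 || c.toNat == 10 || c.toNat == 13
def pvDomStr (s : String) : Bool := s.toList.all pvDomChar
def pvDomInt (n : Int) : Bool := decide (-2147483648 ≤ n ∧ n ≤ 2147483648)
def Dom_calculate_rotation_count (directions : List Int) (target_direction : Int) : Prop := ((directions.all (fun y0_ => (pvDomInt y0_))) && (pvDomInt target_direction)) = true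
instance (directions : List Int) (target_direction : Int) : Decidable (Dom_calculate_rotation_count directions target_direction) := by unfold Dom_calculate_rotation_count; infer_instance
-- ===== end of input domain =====

-- B replaces A's per-element target/opposite branching by one tally pass into four
-- counters plus a closed-form combination (alternative decomposition, same O(n) cost).


-- ===== PORT A =====
def calculate_rotation_count (directions : List Int) (target_direction : Int) : Int :=
  directions.foldl (fun rotation_count direction =>
    if direction = target_direction then rotation_count
    else if direction = 1 then
      (if target_direction = 2 then rotation_count + 2 else rotation_count + 1)
    else if direction = 2 then
      (if target_direction = 1 then rotation_count + 2 else rotation_count + 1)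
    else if direction = 3 then
      (if target_direction = 4 then rotation_count + 2 else rotation_count + 1)
    else if direction = 4 then
      (if target_direction = 3 then rotation_count + 2 else rotation_count + 1)
    else rotation_count) 0

-- ===== PORT B =====
def calculate_rotation_count_alt (directions : List Int) (target_direction : Int) : Int :=
  let cs := directions.foldl (fun (c : Int × Int × Int × Int) d =>
    if d = 1 then (c.1 + 1, c.2.1, c.2.2.1, c.2.2.2)
    else if d = 2 then (c.1, c.2.1 + 1, c.2.2.1, c.2.2.2)
    else if d = 3 then (c.1, c.2.1, c.2.2.1 + 1, c.2.2.2)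
    else if d = 4 then (c.1, c.2.1, c.2.2.1, c.2.2.2 + 1)
    else c) (0, 0, 0, 0)
  let valid := cs.1 + cs.2.1 + cs.2.2.1 + cs.2.2.2
  if target_direction = 1 then valid - cs.1 + cs.2.1
  else if target_direction = 2 then valid - cs.2.1 + cs.1
  else if target_direction = 3 then valid - cs.2.2.1 + cs.2.2.2
  else if target_direction = 4 then valid - cs.2.2.2 + cs.2.2.1
  else valid

-- ===== PRECONDITION & SPEC =====
def Spec_calculate_rotation_count (directions : List Int) (target_direction : Int) (out : Int) : Prop := out = calculate_rotation_count_alt directions target_direction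
instance (directions : List Int) (target_direction : Int) (out : Int) : Decidable (Spec_calculate_rotation_count directions target_direction out) := by unfold Spec_calculate_rotation_count; infer_instance

-- ===== CLAIM (what is proved, stated in full; the proofs are below) =====
def Claim_equal_calculate_rotation_count : Prop := ∀ (directions : List Int) (target_direction : Int), Dom_calculate_rotation_count directions target_direction → Spec_calculate_rotation_count directions target_direction (calculate_rotation_count directions target_direction)

-- ===== LEMMAS AND PROOFS =====
def pvStepA (t r x : Int) : Int :=
  if x = t then r
  else if x = 1 then (if t = 2 then r + 2 else r + 1)
  else if x = 2 then (if t = 1 then r + 2 else r + 1)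
  else if x = 3 then (if t = 4 then r + 2 else r + 1)
  else if x = 4 then (if t = 3 then r + 2 else r + 1)
  else r

def pvStepC (c : Int × Int × Int × Int) (x : Int) : Int × Int × Int × Int :=
  if x = 1 then (c.1 + 1, c.2.1, c.2.2.1, c.2.2.2)
  else if x = 2 then (c.1, c.2.1 + 1, c.2.2.1, c.2.2.2)
  else if x = 3 then (c.1, c.2.1, c.2.2.1 + 1, c.2.2.2)
  else if x = 4 then (c.1, c.2.1, c.2.2.1, c.2.2.2 + 1)
  else c

def pvFinish (t : Int) (cs : Int × Int × Int × Int) : Int :=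
  let valid := cs.1 + cs.2.1 + cs.2.2.1 + cs.2.2.2
  if t = 1 then valid - cs.1 + cs.2.1
  else if t = 2 then valid - cs.2.1 + cs.1
  else if t = 3 then valid - cs.2.2.1 + cs.2.2.2
  else if t = 4 then valid - cs.2.2.2 + cs.2.2.1
  else valid

theorem pvStep_delta (t x : Int) (c : Int × Int × Int × Int) :
    pvFinish t (pvStepC c x) = pvFinish t c + pvStepA t 0 x := by
  rcases c with ⟨a, b, c', d⟩
  unfold pvFinish pvStepC pvStepA
  split_ifs <;> simp_all <;> omega

def pvAdd4 (c c' : Int × Int × Int × Int) : Int × Int × Int × Int :=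
  (c.1 + c'.1, c.2.1 + c'.2.1, c.2.2.1 + c'.2.2.1, c.2.2.2 + c'.2.2.2)

theorem pvFoldC_add (l : List Int) (c : Int × Int × Int × Int) :
    l.foldl pvStepC c = pvAdd4 c (l.foldl pvStepC (0, 0, 0, 0)) := by
  induction l generalizing c with
  | nil => rcases c with ⟨a, b, c', d⟩; simp [pvAdd4]
  | cons x l ih =>
    simp only [List.foldl_cons]
    rw [ih, ih (pvStepC (0, 0, 0, 0) x)]
    generalize l.foldl pvStepC (0, 0, 0, 0) = F
    rcases c with ⟨a, b, c', d⟩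
    rcases F with ⟨fa, fb, fc, fd⟩
    unfold pvStepC pvAdd4
    split_ifs <;> simp <;> ring

theorem pvFinish_add (t : Int) (c c' : Int × Int × Int × Int) :
    pvFinish t (pvAdd4 c c') = pvFinish t c + pvFinish t c' := by
  unfold pvFinish pvAdd4
  split_ifs <;> simp_all <;> ring

theorem pvKey (t : Int) (l : List Int) (r : Int) (c : Int × Int × Int × Int) :
    l.foldl (pvStepA t) r + pvFinish t c = r + pvFinish t (l.foldl pvStepC c) := by
  induction l generalizing r c with
  | nil => simp
  | cons x l ih =>
    simp only [List.foldl_cons]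
    rw [ih, pvFoldC_add l (pvStepC c x), pvFoldC_add l c, pvFinish_add, pvFinish_add,
      pvStep_delta]
    have hA : pvStepA t r x = r + pvStepA t 0 x := by
      unfold pvStepA; split_ifs <;> omega
    omega

theorem pvA_eq (l : List Int) (t : Int) :
    calculate_rotation_count l t = l.foldl (pvStepA t) 0 := rfl

theorem pvB_eq (l : List Int) (t : Int) :
    calculate_rotation_count_alt l t = pvFinish t (l.foldl pvStepC (0, 0, 0, 0)) := rfl

-- ===== VERDICT (by name: the statement is the Claim_ definition above) =====
theorem calculate_rotation_count_spec : Claim_equal_calculate_rotation_count := by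
  intro l t _
  unfold Spec_calculate_rotation_count
  rw [pvA_eq, pvB_eq]
  have h := pvKey t l 0 (0, 0, 0, 0)
  have h0 : pvFinish t (0, 0, 0, 0) = 0 := by unfold pvFinish; split_ifs <;> simp
  omega
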